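-- pv_equiv track=rewrite | github.com/marcoplaisier/weathervane | weathervane/gpio.py | binary_format
-- ===== SOURCE A (Python) =====
-- def binary_format(sequence, bytes_per_line=4):
--     """Format a sequence as binary bytes
--
--     This function converts a sequence into a nicely formatted string of the binary values. The sequence is first
--     converted into a bytearray (which means that only values in the range 0 - 255 are allowed) and then puts each
--     bytes_per_line bytes on a single line. Each line is preceded by the number of the bytes. E.g. 0-3.
--
--     @param sequence:
--     @return: a string, properly formatted
--     """
--     array = bytearray(sequence)
--     test = []
--     for index, item in enumerate(array):
--         if index % bytes_per_line == 0:
--             test.append("\n{:2} - {:2} ".format(index, index + 3))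
--         test.append("{:#010b}".format(item)[2:])
--     return "|".join(test) + "|"
-- ===== SOURCE B (Python) =====
-- def binary_format(sequence, bytes_per_line=4):
--     array = bytearray(sequence)
--     lines = []
--     for start in range(0, len(array), bytes_per_line):
--         chunk = array[start:start + bytes_per_line]
--         header = "\n{:2} - {:2} ".format(start, start + 3)
--         lines.append("|".join([header] + ["{:#010b}".format(b)[2:] for b in chunk]))
--     return "|".join(lines) + "|"
-- ===== Notes on version B (the rewrite author's own statement) =====
-- stated objective: alternative
-- what changed: A makes one flat pass over enumerate(array) deciding headers with a modulo test inside the loop; B iterates over chunk start offsets with range(0, len, bytes_per_line), slices each chunk, and joins [header]+bytes per line, keeping the hardcoded '+3' header.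
-- outside the precondition, e.g. on binary_format([1, 2], -1): A returns '\n 0 -  3 |00000001|\n 1 -  4 |00000010|', B returns '|'; on binary_format([1, 2], 0): A raises ZeroDivisionError, B raises ValueError; on binary_format([300], 4): A raises ValueError, B raises ValueError
import Mathlib
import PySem

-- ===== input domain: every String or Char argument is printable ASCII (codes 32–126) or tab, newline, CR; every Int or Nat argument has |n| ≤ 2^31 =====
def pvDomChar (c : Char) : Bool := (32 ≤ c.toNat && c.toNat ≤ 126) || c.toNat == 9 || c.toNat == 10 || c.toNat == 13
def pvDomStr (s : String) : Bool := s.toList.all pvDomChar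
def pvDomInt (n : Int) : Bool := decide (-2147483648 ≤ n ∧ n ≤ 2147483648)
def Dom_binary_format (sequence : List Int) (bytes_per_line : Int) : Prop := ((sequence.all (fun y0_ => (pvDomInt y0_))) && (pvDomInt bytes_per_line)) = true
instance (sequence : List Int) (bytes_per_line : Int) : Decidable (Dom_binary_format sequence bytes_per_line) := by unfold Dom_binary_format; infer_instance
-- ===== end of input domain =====

-- B replaces A's single enumerate loop with a modulo test by an outer loop over chunk
-- start offsets plus a per-chunk formatting pass (objective: alternative decomposition;
-- same cost). Equivalence of the RETURN value is proved on Pre_ below.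

-- shared formatting helpers (both Pythons use the identical format strings)
-- "{:2}".format(n): right-align to width 2, space padded (exact: str(n) is never empty)
def fmt2 (n : Int) : List Char :=
  let cs := PySem.Int.toChars n
  if cs.length < 2 then ' ' :: cs else cs

-- "\n{:2} - {:2} ".format(i, i + 3)
def headerChars (i : Int) : List Char :=
  '\n' :: (fmt2 i ++ [' ', '-', ' '] ++ fmt2 (i + 3) ++ [' '])

-- "{:#010b}".format(b)[2:] — for 0 ≤ b ≤ 255 (guaranteed by Pre_: bytearray values),
-- '#010b' zero-pads after the '0b' prefix, so dropping the prefix is the binary digits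
-- left-padded with '0' to width 8
def bin8 (b : Int) : List Char :=
  PySem.Chars.zfill (PySem.Int.toBinChars b) 8

-- ===== PORT A =====
def binary_format (sequence : List Int) (bytes_per_line : Int) : String :=
  let test : List (List Char) :=
    (PySem.List.enumerate sequence).foldl
      (fun acc p =>
        (if PySem.Int.mod p.1 bytes_per_line == 0 then acc ++ [headerChars p.1] else acc)
          ++ [bin8 p.2]) []
  String.ofList (PySem.Chars.join ['|'] test ++ ['|'])

-- ===== PORT B =====
def binary_format_alt (sequence : List Int) (bytes_per_line : Int) : String :=
  let lines : List (List Char) :=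
    (PySem.List.pyRange 0 (sequence.length : Int) bytes_per_line).foldl
      (fun acc start =>
        acc ++ [PySem.Chars.join ['|']
          (headerChars start ::
            (PySem.List.slice sequence (some start) (some (start + bytes_per_line))).map bin8)]) []
  String.ofList (PySem.Chars.join ['|'] lines ++ ['|'])

-- ===== PRECONDITION & SPEC =====
-- Pre_ excludes the values bytearray() rejects (outside 0..255: ValueError),
-- bytes_per_line = 0 (ZeroDivisionError in A, ValueError in B's range) and
-- negative bytes_per_line — a nonsensical count, outside the natural domain, on which
-- A's headers fire as an artefact of Python's negative modulo while B's range is empty.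
def Pre_binary_format (sequence : List Int) (bytes_per_line : Int) : Prop :=
  (∀ x ∈ sequence, 0 ≤ x ∧ x ≤ 255) ∧ 1 ≤ bytes_per_line
instance (sequence : List Int) (bytes_per_line : Int) : Decidable (Pre_binary_format sequence bytes_per_line) := by unfold Pre_binary_format; infer_instance

def pvWitness_binary_format : List Int × Int := ([1, 2, 3, 4, 5], 4)

def Spec_binary_format (sequence : List Int) (bytes_per_line : Int) (out : String) : Prop := out = binary_format_alt sequence bytes_per_line
instance (sequence : List Int) (bytes_per_line : Int) (out : String) : Decidable (Spec_binary_format sequence bytes_per_line out) := by unfold Spec_binary_format; infer_instance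

-- ===== CLAIM (what is proved, stated in full; the proofs are below) =====
def Claim_equal_binary_format : Prop := ∀ (sequence : List Int) (bytes_per_line : Int), Dom_binary_format sequence bytes_per_line → Pre_binary_format sequence bytes_per_line → Spec_binary_format sequence bytes_per_line (binary_format sequence bytes_per_line)

-- ===== LEMMAS AND PROOFS =====

-- A's loop body as a structural recursion (indices supplied by enumerate)
def gA (k : Int) : List (Int × Int) → List (List Char)
  | [] => []
  | p :: ps =>
    (if PySem.Int.mod p.1 k == 0 then [headerChars p.1] else []) ++ bin8 p.2 :: gA k ps

-- the common chunked normal form: one header then km+1 bytes per chunk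
def gB (km : Nat) (start : Int) : List Int → List (List Char)
  | [] => []
  | x :: xs =>
    headerChars start :: ((x :: xs).take (km + 1)).map bin8
      ++ gB km (start + ((km : Int) + 1)) (xs.drop km)
termination_by l => l.length
decreasing_by simp

lemma foldA_eq_gA (k : Int) (pairs : List (Int × Int)) (acc : List (List Char)) :
    pairs.foldl
      (fun acc p =>
        (if PySem.Int.mod p.1 k == 0 then acc ++ [headerChars p.1] else acc) ++ [bin8 p.2]) acc
      = acc ++ gA k pairs := by
  induction pairs generalizing acc with
  | nil => simp [gA]
  | cons p ps ih =>
    rw [List.foldl_cons, ih]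
    by_cases h : PySem.Int.mod p.1 k == 0 <;> simp [gA, h]

lemma foldB_eq_map {α : Type} (f : α → List Char) (l : List α) (acc : List (List Char)) :
    l.foldl (fun acc x => acc ++ [f x]) acc = acc ++ l.map f := by
  induction l generalizing acc with
  | nil => simp
  | cons x xs ih => simp [ih]

lemma pyRange_pos_nil (a b s : Int) (hs : 0 < s) (h : b ≤ a) :
    PySem.List.pyRange a b s = [] := by
  rw [PySem.List.pyRange_of_pos _ _ hs]
  simp [show ¬ a < b by omega]

lemma pyRange_pos_cons (a b s : Int) (hs : 0 < s) (h : a < b) :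
    PySem.List.pyRange a b s = a :: PySem.List.pyRange (a + s) b s := by
  rw [PySem.List.pyRange_of_pos _ _ hs, PySem.List.pyRange_of_pos _ _ hs]
  rw [if_pos h]
  by_cases h2 : a + s < b
  · rw [if_pos h2]
    have hq : 0 ≤ (b - a - 1) / s := Int.ediv_nonneg (by omega) (by omega)
    have e2 : (b - a + s - 1) / s = (b - a - 1) / s + 1 := by
      have e1 : b - a + s - 1 = (b - a - 1) + 1 * s := by ring
      rw [e1, Int.add_mul_ediv_right _ _ (by omega)]
    have e3 : b - (a + s) + s - 1 = b - a - 1 := by ring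
    have e4 : ((b - a + s - 1) / s).toNat = ((b - (a + s) + s - 1) / s).toNat + 1 := by
      rw [e2, e3]; omega
    rw [e4, List.range_succ_eq_map, List.map_cons, List.map_map]
    refine congrArg₂ _ (by ring) (List.map_congr_left fun j _ => ?_)
    simp [Function.comp, Nat.succ_eq_add_one]
    ring
  · rw [if_neg h2]
    have e5 : (b - a + s - 1) / s = 1 := by
      have e1 : b - a + s - 1 = (b - a - 1) + 1 * s := by ring
      rw [e1, Int.add_mul_ediv_right _ _ (by omega),
        Int.ediv_eq_zero_of_lt (by omega) (by omega), zero_add]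
    rw [e5]
    simp

lemma join_append_cons (sep p q : List Char) (ps qs : List (List Char)) :
    PySem.Chars.join sep ((p :: ps) ++ (q :: qs))
      = PySem.Chars.join sep (p :: ps) ++ sep ++ PySem.Chars.join sep (q :: qs) := by
  induction ps generalizing p with
  | nil => simp [PySem.Chars.join_cons_cons, PySem.Chars.join_singleton]
  | cons p2 ps' ih =>
    simp only [List.cons_append] at ih ⊢
    rw [PySem.Chars.join_cons_cons, ih p2, PySem.Chars.join_cons_cons]
    simp [List.append_assoc]

lemma join_join (sep : List Char) (gs : List (List (List Char)))
    (h : ∀ g ∈ gs, g ≠ []) :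
    PySem.Chars.join sep (gs.map (PySem.Chars.join sep))
      = PySem.Chars.join sep gs.flatten := by
  induction gs with
  | nil => simp [PySem.Chars.join_nil]
  | cons g gs' ih =>
    obtain ⟨a, as, rfl⟩ : ∃ a as, g = a :: as := by
      cases hg : g with
      | nil => exact absurd rfl (hg ▸ h g (List.mem_cons_self))
      | cons a as => exact ⟨a, as, rfl⟩
    cases gs' with
    | nil => simp [PySem.Chars.join_singleton]
    | cons g2 rest =>
      obtain ⟨b2, bs2, rfl⟩ : ∃ b bs, g2 = b :: bs := by
        cases hg : g2 with
        | nil => exact absurd rfl (hg ▸ h g2 (by simp))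
        | cons b bs => exact ⟨b, bs, rfl⟩
      have hne : ∀ g ∈ (b2 :: bs2) :: rest, g ≠ [] := fun g hg => h g (List.mem_cons_of_mem _ hg)
      rw [List.map_cons, List.map_cons, PySem.Chars.join_cons_cons, ← List.map_cons,
        ih hne]
      have hfl : ((a :: as) :: (b2 :: bs2) :: rest).flatten
          = (a :: as) ++ (b2 :: (bs2 ++ rest.flatten)) := by simp
      rw [hfl, join_append_cons]
      simp

lemma main_gA_gB (k : Int) (hk : 1 ≤ k) :
    ∀ n (seq : List Int), seq.length ≤ n → ∀ b : Int, 0 ≤ b → b % k = 0 →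
      (gA k (PySem.List.enumerate seq b) = gB (k.toNat - 1) b seq) ∧
      (∀ c : Nat, 1 ≤ c → (c : Int) < k →
        gA k (PySem.List.enumerate seq (b + (c : Int)))
          = (seq.take (k.toNat - c)).map bin8
            ++ gB (k.toNat - 1) (b + k) (seq.drop (k.toNat - c))) := by
  have hkpos : (0 : Int) < k := by omega
  intro n
  induction n with
  | zero =>
    intro seq hlen b hb hbmod
    have hnil : seq = [] := List.eq_nil_of_length_eq_zero (by omega)
    subst hnil
    refine ⟨by simp [PySem.List.enumerate_nil, gA, gB], fun c _ _ => ?_⟩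
    simp [PySem.List.enumerate_nil, gA, gB]
  | succ n ih =>
    intro seq hlen b hb hbmod
    match seq with
    | [] =>
      refine ⟨by simp [PySem.List.enumerate_nil, gA, gB], fun c _ _ => ?_⟩
      simp [PySem.List.enumerate_nil, gA, gB]
    | x :: xs =>
      have hxs : xs.length ≤ n := by simp at hlen; omega
      have hmodb : PySem.Int.mod b k = b % k := PySem.Int.mod_eq_emod_of_pos hkpos
      constructor
      · -- at a chunk boundary: emit the header, then the bytes of the chunk
        rw [PySem.List.enumerate_cons]
        show (if PySem.Int.mod b k == 0 then [headerChars b] else [])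
            ++ bin8 x :: gA k (PySem.List.enumerate xs (b + 1)) = _
        rw [hmodb, hbmod]
        simp only [BEq.rfl, if_pos]
        show headerChars b :: bin8 x :: gA k (PySem.List.enumerate xs (b + 1)) = _
        rw [show gB (k.toNat - 1) b (x :: xs)
            = headerChars b :: ((x :: xs).take (k.toNat - 1 + 1)).map bin8
              ++ gB (k.toNat - 1) (b + (((k.toNat - 1 : Nat) : Int) + 1)) (xs.drop (k.toNat - 1))
          from by rw [gB]]
        have hcast : ((k.toNat - 1 : Nat) : Int) + 1 = k := by omega
        rw [hcast]
        by_cases hk1 : k = 1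
        · subst hk1
          simp only [Int.toNat_one]
          have hmain := (ih xs hxs (b + 1) (by omega) (by simp)).1
          simp [hmain]
        · have hk2 : (2 : Int) ≤ k := by omega
          have haux := (ih xs hxs b hb hbmod).2 1 le_rfl (by push_cast; omega)
          push_cast at haux
          rw [List.take_succ_cons, List.map_cons, List.cons_append, haux]
          simp
      · -- inside a chunk: no header until the next multiple of k
        intro c hc hck
        rw [PySem.List.enumerate_cons]
        show (if PySem.Int.mod (b + (c : Int)) k == 0 then [headerChars (b + (c : Int))] else [])
            ++ bin8 x :: gA k (PySem.List.enumerate xs (b + (c : Int) + 1)) = _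
        have hmodc : PySem.Int.mod (b + (c : Int)) k = (c : Int) := by
          rw [PySem.Int.mod_eq_emod_of_pos hkpos, Int.add_emod, hbmod]
          simp [Int.emod_emod_of_dvd]
          exact Int.emod_eq_of_lt (by positivity) hck
        have hcne : ¬ ((c : Int) == 0) = true := by
          simp; omega
        rw [hmodc, if_neg hcne]
        have hm1 : 1 ≤ k.toNat - c := by omega
        obtain ⟨m, hm⟩ : ∃ m, k.toNat - c = m + 1 := ⟨k.toNat - c - 1, by omega⟩
        rw [hm, List.take_succ_cons, List.drop_succ_cons, List.map_cons, List.nil_append,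
          List.cons_append]
        by_cases hcase : ((c : Int) + 1) < k
        · have haux := (ih xs hxs b hb hbmod).2 (c + 1) (by omega) (by push_cast; omega)
          push_cast at haux
          have hm' : k.toNat - (c + 1) = m := by omega
          rw [hm'] at haux
          rw [show b + (c : Int) + 1 = b + ((c : Int) + 1) from by ring, haux]
        · have hck' : (c : Int) + 1 = k := by omega
          have hmain := (ih xs hxs (b + k) (by omega) (by
            rw [Int.add_emod, hbmod, Int.emod_self]; simp)).1
          have hm0 : m = 0 := by omega
          subst hm0
          rw [show b + (c : Int) + 1 = b + k from by omega]
          simp [hmain]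

lemma flatMap_groups (k : Int) (hk : 1 ≤ k) (seq : List Int) :
    ∀ n (b : Nat), seq.length - b ≤ n →
      (PySem.List.pyRange (b : Int) (seq.length : Int) k).flatMap
          (fun s => headerChars s
            :: (PySem.List.slice seq (some s) (some (s + k))).map bin8)
        = gB (k.toNat - 1) (b : Int) (seq.drop b) := by
  intro n
  induction n with
  | zero =>
    intro b hbn
    rw [pyRange_pos_nil _ _ _ (by omega) (by exact_mod_cast (by omega : seq.length ≤ b))]
    rw [List.drop_eq_nil_of_le (by omega)]
    simp [gB]
  | succ n ih =>
    intro b hbn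
    by_cases hlt : b < seq.length
    · rw [pyRange_pos_cons _ _ _ (by omega) (by exact_mod_cast hlt)]
      rw [List.flatMap_cons]
      have hbk : (b : Int) + k = ((b + k.toNat : Nat) : Int) := by push_cast; omega
      rw [hbk, ih (b + k.toNat) (by omega)]
      rw [PySem.List.slice_natCast seq b (b + k.toNat)]
      have hdb : seq.drop b = seq[b] :: seq.drop (b + 1) := (List.getElem_cons_drop hlt).symm
      rw [hdb]
      rw [show gB (k.toNat - 1) (b : Int) (seq[b] :: seq.drop (b + 1))
          = headerChars b :: ((seq[b] :: seq.drop (b + 1)).take (k.toNat - 1 + 1)).map bin8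
            ++ gB (k.toNat - 1) ((b : Int) + (((k.toNat - 1 : Nat) : Int) + 1))
                ((seq.drop (b + 1)).drop (k.toNat - 1))
        from by rw [gB]]
      rw [List.drop_drop]
      have e1 : b + 1 + (k.toNat - 1) = b + k.toNat := by omega
      have e2 : k.toNat - 1 + 1 = k.toNat := by omega
      have e3 : b + k.toNat - b = k.toNat := by omega
      have e4 : (b : Int) + (((k.toNat - 1 : Nat) : Int) + 1) = ((b + k.toNat : Nat) : Int) := by
        push_cast; omega
      rw [e1, e2, e3, e4, ← hdb]
    · rw [pyRange_pos_nil _ _ _ (by omega) (by exact_mod_cast (by omega : seq.length ≤ b))]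
      rw [List.drop_eq_nil_of_le (by omega)]
      simp [gB]

-- ===== VERDICT (by name: the statement is the Claim_ definition above) =====
theorem binary_format_spec : Claim_equal_binary_format := by
  intro seq k _ hpre
  obtain ⟨-, hk⟩ := hpre
  unfold Spec_binary_format binary_format binary_format_alt
  simp only []
  rw [foldA_eq_gA, foldB_eq_map, List.nil_append, List.nil_append]
  congr 1
  have hgroups : ∀ g ∈ (PySem.List.pyRange 0 (seq.length : Int) k).map
      (fun s => headerChars s :: (PySem.List.slice seq (some s) (some (s + k))).map bin8),
      g ≠ [] := by
    intro g hg
    obtain ⟨s, -, rfl⟩ := List.mem_map.mp hg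
    simp
  rw [show (PySem.List.pyRange 0 (seq.length : Int) k).map
        (fun s => PySem.Chars.join ['|']
          (headerChars s :: (PySem.List.slice seq (some s) (some (s + k))).map bin8))
      = ((PySem.List.pyRange 0 (seq.length : Int) k).map
          (fun s => headerChars s
            :: (PySem.List.slice seq (some s) (some (s + k))).map bin8)).map
          (PySem.Chars.join ['|'])
    from by rw [List.map_map]; rfl]
  rw [join_join ['|'] _ hgroups, ← List.flatMap_def]
  have hflat := flatMap_groups k hk seq seq.length 0 (by omega)
  simp only [Nat.cast_zero, List.drop_zero] at hflat
  rw [hflat]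
  have hA := (main_gA_gB k hk seq.length seq le_rfl 0 le_rfl (by simp)).1
  rw [hA]
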